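-- pv_equiv track=rewrite | github.com/joshuahvs/DDP1 | TP03/tp3 2.py | count
-- ===== SOURCE A (Python) =====
-- def to_list(dataframe):
--     return dataframe[0]
--
-- def get_column_names(dataframe):
--     return dataframe[1]
--
-- def get_column_types(dataframe):
--     return dataframe[2]
--
-- def count(dataframe, col_name):
--     header = get_column_names(dataframe)
--     types = get_column_types(dataframe)
--     # Mengecek apakah ada kolom dengan nama yang diinginkan
--     try:
--         index = header.index(col_name)
--     except ValueError:
--         raise Exception(f"Kolom {col_name} tidak ditemukan.")
--     # Mengecek apakah tipe datanya sesuai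
--     if types[index] == "int" or types[index] == "float":
--         raise Exception(f"Kolom {col_name} harus bertipe string.")
--     dict = {}
--     data = to_list(dataframe)
--     # Mengiterasi isi data
--     for i in data:
--         key = i[index] # index berdasarkan kolom yang diminta
--         # Menghitung setiap nilai unik
--         if key in dict.keys():
--             dict[key] += 1
--         else:
--             dict[key] = 1
--     # Jika tabel kosong
--     if dict == {}:
--         raise Exception("Tabel kosong.")
--     return dict
-- ===== SOURCE B (Python) =====
-- def count(dataframe, col_name):
--     header = dataframe[1]
--     types = dataframe[2]
--     try:
--         index = header.index(col_name)
--     except ValueError: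
--         raise Exception(f"Kolom {col_name} tidak ditemukan.")
--     if types[index] == "int" or types[index] == "float":
--         raise Exception(f"Kolom {col_name} harus bertipe string.")
--     # Partition-and-shrink tally: repeatedly take the first remaining value,
--     # strip all its occurrences, and record how many were removed.
--     col = [row[index] for row in dataframe[0]]
--     items = []
--     while col:
--         v = col[0]
--         rest = [x for x in col[1:] if x != v]
--         items.append((v, len(col) - len(rest)))
--         col = rest
--     if not items:
--         raise Exception("Tabel kosong.")
--     return dict(items)
-- ===== Notes on version B (the rewrite author's own statement) =====
-- stated objective: alternative
-- what changed: Replaces the dict-accumulating counting pass with a partition-and-shrink loop that uses no dictionary at all: take the first remaining value, filter out all its occurrences, record the shrinkage as its count, and repeat on the shrunken list.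
import Mathlib
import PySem

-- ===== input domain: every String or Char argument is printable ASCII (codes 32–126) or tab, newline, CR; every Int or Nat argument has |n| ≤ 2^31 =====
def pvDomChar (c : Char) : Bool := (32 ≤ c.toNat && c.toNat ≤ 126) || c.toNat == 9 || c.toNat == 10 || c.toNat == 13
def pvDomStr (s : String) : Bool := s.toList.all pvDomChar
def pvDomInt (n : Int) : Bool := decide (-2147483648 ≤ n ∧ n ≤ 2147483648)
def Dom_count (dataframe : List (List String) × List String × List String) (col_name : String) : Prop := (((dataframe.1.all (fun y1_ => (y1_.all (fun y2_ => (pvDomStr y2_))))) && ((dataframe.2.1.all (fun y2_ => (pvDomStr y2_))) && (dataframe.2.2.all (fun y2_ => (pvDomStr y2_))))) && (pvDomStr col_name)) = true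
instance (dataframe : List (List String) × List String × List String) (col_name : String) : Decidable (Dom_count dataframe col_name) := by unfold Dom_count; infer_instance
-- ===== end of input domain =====

-- B replaces A's dict-accumulating pass with a dictionary-free partition-and-shrink loop (alternative decomposition, same results).


-- ===== PORT A =====
def count (dataframe : List (List String) × List String × List String) (col_name : String) : List (String × Int) :=
  let header := dataframe.2.1
  let types := dataframe.2.2
  match PySem.List.index? header col_name with
  | none => []  -- raise Exception("Kolom … tidak ditemukan.")
  | some index =>
    match PySem.List.pyGet? types (index : Int) with
    | none => []  -- IndexError on types[index]
    | some t =>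
      if t = "int" ∨ t = "float" then []  -- raise Exception("… harus bertipe string.")
      else
        let d := dataframe.1.foldl (fun d row =>
          match PySem.List.pyGet? row (index : Int) with
          | none => d  -- IndexError on i[index] (excluded by Pre_)
          | some key => if d.contains key then d.modify key 0 (· + 1) else d.insert key 1)
          PySem.Dict.empty
        if d.items = [] then []  -- raise Exception("Tabel kosong.")
        else d.items

-- ===== PORT B =====
-- Source B's while loop over the shrinking column, as the obvious structural recursion
def tallyB : List String → List (String × Int)
  | [] => []
  | v :: t =>
    let rest := t.filter (fun x => x ≠ v)
    (v, ((t.length + 1 : Int) - rest.length)) :: tallyB rest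
termination_by l => l.length
decreasing_by
  simp only [List.length_unattach, List.length_cons, Nat.lt_succ_iff]
  exact le_trans (List.length_filter_le _ _) (by simp)

def count_alt (dataframe : List (List String) × List String × List String) (col_name : String) : List (String × Int) :=
  let header := dataframe.2.1
  let types := dataframe.2.2
  match PySem.List.index? header col_name with
  | none => []  -- raise Exception("Kolom … tidak ditemukan.")
  | some index =>
    match PySem.List.pyGet? types (index : Int) with
    | none => []  -- IndexError on types[index]
    | some t =>
      if t = "int" ∨ t = "float" then []  -- raise Exception("… harus bertipe string.")
      else
        let col := dataframe.1.map (fun row => PySem.List.pyGetD row (index : Int) "")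
        let items := tallyB col
        if items = [] then []  -- raise Exception("Tabel kosong.")
        else items  -- dict(items): keys are distinct, so the assoc list is items itself

-- ===== PRECONDITION & SPEC =====
-- Pre_ excludes exactly the inputs where Python A raises: unknown column, int/float column,
-- types/rows too short for the column index, and the empty table.
def Pre_count (dataframe : List (List String) × List String × List String) (col_name : String) : Prop :=
  col_name ∈ dataframe.2.1 ∧
  dataframe.2.1.idxOf col_name < dataframe.2.2.length ∧
  dataframe.2.2.getD (dataframe.2.1.idxOf col_name) "" ≠ "int" ∧
  dataframe.2.2.getD (dataframe.2.1.idxOf col_name) "" ≠ "float" ∧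
  dataframe.1 ≠ [] ∧
  ∀ r ∈ dataframe.1, dataframe.2.1.idxOf col_name < r.length
instance (dataframe : List (List String) × List String × List String) (col_name : String) : Decidable (Pre_count dataframe col_name) := by unfold Pre_count; infer_instance

def pvWitness_count : (List (List String) × List String × List String) × String :=
  (([["a"], ["b"], ["a"]], ["c"], ["str"]), "c")

def Spec_count (dataframe : List (List String) × List String × List String) (col_name : String) (out : List (String × Int)) : Prop := out = count_alt dataframe col_name
instance (dataframe : List (List String) × List String × List String) (col_name : String) (out : List (String × Int)) : Decidable (Spec_count dataframe col_name out) := by unfold Spec_count; infer_instance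

-- ===== CLAIM (what is proved, stated in full; the proofs are below) =====
def Claim_equal_count : Prop := ∀ (dataframe : List (List String) × List String × List String) (col_name : String), Dom_count dataframe col_name → Pre_count dataframe col_name → Spec_count dataframe col_name (count dataframe col_name)

-- ===== LEMMAS AND PROOFS =====

-- A's branch "if key in dict: dict[key]+=1 else: dict[key]=1" is a Counter step.
lemma step_eq_modify (d : PySem.Dict String Int) (key : String) :
    (if d.contains key then d.modify key 0 (· + 1) else d.insert key 1) = d.modify key 0 (· + 1) := by
  by_cases h : d.contains key
  · simp [h]
  · simp only [h, Bool.false_eq_true, if_false, PySem.Dict.modify, PySem.Dict.getD]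
    have hn : d.get? key = none := by
      rw [PySem.Dict.get?_eq_none_iff_contains]; simpa using h
    simp [hn]

-- A's loop over the rows equals Counter of the extracted column.
lemma fold_eq_counter (rows : List (List String)) (k : Nat) (d : PySem.Dict String Int)
    (h : ∀ r ∈ rows, k < r.length) :
    rows.foldl (fun d row =>
        match PySem.List.pyGet? row (k : Int) with
        | none => d
        | some key => if d.contains key then d.modify key 0 (· + 1) else d.insert key 1) d
      = (rows.map (fun r => PySem.List.pyGetD r (k : Int) "")).foldl
          (fun d x => d.modify x 0 (· + 1)) d := by
  induction rows generalizing d with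
  | nil => rfl
  | cons r rs ih =>
    have hr : k < r.length := h r (by simp)
    have hget : PySem.List.pyGet? r (k : Int) = some r[k] := by
      simp [PySem.List.pyGet?_natCast, List.getElem?_eq_getElem hr]
    have hgetD : PySem.List.pyGetD r (k : Int) "" = r[k] := by
      simp [PySem.List.pyGetD_natCast, List.getD, List.getElem?_eq_getElem hr]
    simp only [List.foldl_cons, List.map_cons, hget, hgetD]
    rw [step_eq_modify d]
    exact ih _ (fun r hmem => h r (by simp [hmem]))

lemma index?_of_mem (xs : List String) (v : String) (h : v ∈ xs) :
    PySem.List.index? xs v = some (xs.idxOf v) := by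
  induction xs with
  | nil => simp at h
  | cons x xs ih =>
    by_cases hx : x = v
    · subst hx; rw [PySem.List.index?_cons_self]; simp [List.idxOf_cons_self]
    · have hv : v ∈ xs := by
        cases h with
        | head => exact absurd rfl hx
        | tail _ h => exact h
      rw [PySem.List.index?_cons_of_ne xs hx, ih hv]
      simp [List.idxOf_cons_ne _ hx]

-- set(...) of a list commutes with filtering; counts of survivors are preserved;
-- together: Counter's items equal B's partition-and-shrink tally.
lemma filter_ofList (p : String → Bool) (t : List String) :
    (PySem.Set.ofList t).filter p = PySem.Set.ofList (t.filter p) := by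
  induction t with
  | nil => rfl
  | cons a t ih =>
    rw [PySem.Set.ofList_cons, PySem.Set.discard]
    by_cases hp : p a = true
    · rw [List.filter_cons_of_pos hp, List.filter_cons, if_pos hp, PySem.Set.ofList_cons,
        PySem.Set.discard, ← ih, List.filter_filter, List.filter_filter]
      congr 1
      apply List.filter_congr
      intro y _
      rw [Bool.and_comm]
    · rw [List.filter_cons_of_neg hp, List.filter_cons, if_neg hp, ← ih, List.filter_filter]
      apply List.filter_congr
      intro y _
      by_cases hy : y = a
      · subst hy; simp [hp]
      · simp [hy]

lemma filter_ne_length (t : List String) (v : String) :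
    (t.filter (fun x => decide (x ≠ v))).length + t.count v = t.length := by
  induction t with
  | nil => simp
  | cons a t ih =>
    by_cases h : a = v
    · subst h
      rw [List.filter_cons_of_neg (by simp), List.count_cons_self, List.length_cons]
      omega
    · rw [List.filter_cons_of_pos (by simp [h]), List.count_cons_of_ne h, List.length_cons,
        List.length_cons]
      omega

lemma set_map_count_eq_tallyB (col : List String) :
    (PySem.Set.ofList col).map (fun k => (k, (col.count k : Int))) = tallyB col := by
  induction col using tallyB.induct with
  | case1 => simp [tallyB]
  | case2 v t rest ih =>
    have hrw : rest = t.filter (fun x => decide (x ≠ v)) := by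
      show (List.filter _ t.attach).unattach = _
      rw [List.unattach_filter (g := fun x => decide (x ≠ v)) (hf := fun x h => rfl),
        List.unattach_attach]
    rw [hrw] at ih
    rw [tallyB]
    rw [PySem.Set.ofList_cons, PySem.Set.discard, List.map_cons]
    have hrest : List.filter (fun y => !y == v) (PySem.Set.ofList t)
        = PySem.Set.ofList (t.filter (fun x => decide (x ≠ v))) := by
      rw [filter_ofList]
      congr 1
      apply List.filter_congr
      intro y _; by_cases h : y = v <;> simp [h]
    rw [hrest]
    congr 1
    · have hl := filter_ne_length t v
      rw [List.count_cons_self]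
      congr 1
      push_cast
      omega
    · rw [← ih]
      apply List.map_congr_left
      intro k hk
      have hk' : k ∈ t.filter (fun x => decide (x ≠ v)) := (PySem.Set.mem_ofList _ _).mp hk
      have hkv : k ≠ v := by simpa using List.of_mem_filter hk'
      congr 1
      rw [List.count_cons_of_ne (Ne.symm hkv)]
      norm_cast
      rw [List.count_filter]
      simp [hkv]

-- ===== VERDICT (by name: the statement is the Claim_ definition above) =====
theorem count_spec : Claim_equal_count := by
  intro df col hdom hpre
  obtain ⟨hmem, hlt, hi, hf, hne, hrows⟩ := hpre
  simp only [Spec_count, count, count_alt]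
  rw [index?_of_mem _ _ hmem]
  set k := df.2.1.idxOf col with hk
  have hget : PySem.List.pyGet? df.2.2 (k : Int) = some (df.2.2.getD k "") := by
    simp [PySem.List.pyGet?_natCast, List.getElem?_eq_getElem hlt, List.getD]
  have hcond : ¬(df.2.2.getD k "" = "int" ∨ df.2.2.getD k "" = "float") := by
    rintro (h | h)
    · exact hi h
    · exact hf h
  simp only [hget]
  rw [if_neg hcond, if_neg hcond]
  rw [fold_eq_counter df.1 k PySem.Dict.empty hrows, ← PySem.Dict.counter_eq_foldl,
    PySem.Dict.items_counter, set_map_count_eq_tallyB]
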